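-- pv_equiv track=rewrite | github.com/MMXC/vibex | scripts/current_report/_active_projects.py | _get_current_stage
-- ===== SOURCE A (Python) =====
-- def _get_current_stage(stages: dict) -> str:
--     """Get the currently in-progress stage name, or last non-done stage."""
--     for name, info in stages.items():
--         if info.get("status") == "in-progress":
--             return name
--     for name, info in reversed(list(stages.items())):
--         if info.get("status") not in ("done",):
--             return name
--     return "completed"
-- ===== SOURCE B (Python) =====
-- def _get_current_stage(stages: dict) -> str:
--     """Single forward pass: remember first in-progress and last non-done stage."""
--     first_inprogress = None
--     last_nondone = None
--     for name, info in stages.items():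
--         status = info.get("status")
--         if first_inprogress is None and status == "in-progress":
--             first_inprogress = name
--         if status != "done":
--             last_nondone = name
--     if first_inprogress is not None:
--         return first_inprogress
--     if last_nondone is not None:
--         return last_nondone
--     return "completed"
-- ===== Notes on version B (the rewrite author's own statement) =====
-- stated objective: alternative
-- what changed: Replaced A's two passes (forward scan for in-progress, reversed scan for last non-done) by one forward pass maintaining two accumulators (first in-progress, last non-done), combined after the loop.
import Mathlib
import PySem

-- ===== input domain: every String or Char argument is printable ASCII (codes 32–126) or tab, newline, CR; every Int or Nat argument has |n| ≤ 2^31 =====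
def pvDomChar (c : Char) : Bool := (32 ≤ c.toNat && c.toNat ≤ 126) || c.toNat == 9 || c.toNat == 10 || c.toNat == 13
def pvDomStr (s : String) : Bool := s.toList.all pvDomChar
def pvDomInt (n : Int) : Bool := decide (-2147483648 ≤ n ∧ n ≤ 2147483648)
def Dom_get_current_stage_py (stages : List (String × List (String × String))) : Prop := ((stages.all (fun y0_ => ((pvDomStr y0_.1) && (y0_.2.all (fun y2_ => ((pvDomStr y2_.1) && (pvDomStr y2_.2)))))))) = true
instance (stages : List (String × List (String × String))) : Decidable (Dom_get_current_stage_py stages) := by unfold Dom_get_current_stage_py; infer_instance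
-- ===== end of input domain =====

-- B replaces A's forward + reversed scans with one forward pass keeping two accumulators; return value only, same complexity.

-- ===== PORT A =====
-- first forward loop of A: return the first name whose status is "in-progress"
def pvFindInProgress : List (String × List (String × String)) → Option String
  | [] => none
  | (name, info) :: rest =>
    if (PySem.Dict.mk info).get? "status" = some "in-progress" then some name
    else pvFindInProgress rest

-- second loop of A over reversed(list(stages.items())): first name whose status is not in ("done",)
def pvFindNonDone : List (String × List (String × String)) → Option String
  | [] => none
  | (name, info) :: rest =>
    if (PySem.Dict.mk info).get? "status" ≠ some "done" then some name
    else pvFindNonDone rest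

def get_current_stage_py (stages : List (String × List (String × String))) : String :=
  match pvFindInProgress stages with
  | some name => name
  | none =>
    match pvFindNonDone stages.reverse with
    | some name => name
    | none => "completed"

-- ===== PORT B =====
def get_current_stage_py_alt (stages : List (String × List (String × String))) : String :=
  let st := stages.foldl
    (fun (acc : Option String × Option String) p =>
      let status := (PySem.Dict.mk p.2).get? "status"
      ((if acc.1.isNone ∧ status = some "in-progress" then some p.1 else acc.1),
       (if status ≠ some "done" then some p.1 else acc.2)))
    (none, none)
  match st.1 with
  | some name => name
  | none =>
    match st.2 with
    | some name => name
    | none => "completed"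

-- ===== PRECONDITION & SPEC =====
def Spec_get_current_stage_py (stages : List (String × List (String × String))) (out : String) : Prop := out = get_current_stage_py_alt stages
instance (stages : List (String × List (String × String))) (out : String) : Decidable (Spec_get_current_stage_py stages out) := by unfold Spec_get_current_stage_py; infer_instance

-- ===== CLAIM (what is proved, stated in full; the proofs are below) =====
def Claim_equal_get_current_stage_py : Prop := ∀ (stages : List (String × List (String × String))), Dom_get_current_stage_py stages → Spec_get_current_stage_py stages (get_current_stage_py stages)

-- ===== LEMMAS AND PROOFS =====

-- scanning for a non-done stage from the back: appending one element puts it first among candidates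
theorem pvFindNonDone_append (ys : List (String × List (String × String)))
    (p : String × List (String × String)) :
    pvFindNonDone (ys ++ [p]) =
      (pvFindNonDone ys).or
        (if (PySem.Dict.mk p.2).get? "status" ≠ some "done" then some p.1 else none) := by
  induction ys with
  | nil => simp only [List.nil_append, pvFindNonDone]; split <;> simp
  | cons q rest ih =>
    simp only [List.cons_append, pvFindNonDone]
    split <;> simp [ih]

-- the fold's invariant: first component is the first in-progress (unless already fixed by acc),
-- second component is the last non-done (falling back to acc)
theorem pvFold_invariant (xs : List (String × List (String × String)))
    (a b : Option String) :
    xs.foldl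
      (fun (acc : Option String × Option String) p =>
        let status := (PySem.Dict.mk p.2).get? "status"
        ((if acc.1.isNone ∧ status = some "in-progress" then some p.1 else acc.1),
         (if status ≠ some "done" then some p.1 else acc.2)))
      (a, b)
    = (a.or (pvFindInProgress xs), (pvFindNonDone xs.reverse).or b) := by
  induction xs generalizing a b with
  | nil => simp [pvFindInProgress, pvFindNonDone]
  | cons p rest ih =>
    simp only [List.foldl_cons, ih, List.reverse_cons, pvFindNonDone_append,
      pvFindInProgress, Option.or_assoc]
    simp only [Prod.mk.injEq]
    refine ⟨?_, ?_⟩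
    · cases a <;> simp
      split <;> simp
    · congr 1
      split <;> simp

-- ===== VERDICT (by name: the statement is the Claim_ definition above) =====
theorem get_current_stage_py_spec : Claim_equal_get_current_stage_py := by
  intro stages _
  unfold Spec_get_current_stage_py get_current_stage_py get_current_stage_py_alt
  rw [pvFold_invariant]
  simp only [Option.or_none, Option.none_or]
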